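-- pv_equiv track=rewrite | github.com/pypi-data/pypi-mirror-401 | packages/stanlogic/stanlogic-2.1.0.tar.gz/stanlogic-2.1.0/src/stanlogic/BoolMin2D.py | filter_prime_implicants
-- ===== SOURCE A (Python) =====
-- from collections import defaultdict
--
-- def filter_prime_implicants(groups):
--     """
--     Remove redundant groups that are completely covered by larger groups.
--     Uses bitmask operations for efficient subset checking with size-based optimization.
--
--     Args:
--         groups: List of integer bitmasks representing K-map groups
--
--     Returns:
--         List of prime implicant bitmasks (non-redundant groups)
--     """
--     if not groups:
--         return []
--
--     primes = []
--     # Sort by size (bit count) descending for early pruning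
--     groups_sorted = sorted(groups, key=lambda g: g.bit_count(), reverse=True)
--
--     # Group by size for efficient filtering
--     size_groups = defaultdict(list)
--     for g in groups_sorted:
--         size_groups[g.bit_count()].append(g)
--
--     for i, g in enumerate(groups_sorted):
--         is_subset = False
--         g_size = g.bit_count()
--
--         # OPTIMIZATION: Only check against groups of SAME OR LARGER size
--         # A smaller group cannot contain a larger one
--         for size in sorted(size_groups.keys(), reverse=True):
--             if size < g_size:
--                 break  # All remaining groups are smaller, skip them
--
--             for other in size_groups[size]:
--                 if other == g:
--                     continue
--                 # Bitwise AND: if g is subset of other, (g & other) == g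
--                 # AND g must be smaller or equal in size
--                 if g_size <= size and (g & other) == g:
--                     is_subset = True
--                     break
--
--             if is_subset:
--                 break
--
--         if not is_subset:
--             primes.append(g)
--     return primes
-- ===== SOURCE B (Python) =====
-- def filter_prime_implicants(groups):
--     """Keep only groups not strictly below any other group.
--
--     Online maximal-antichain maintenance: one pass over the distinct values
--     keeps a running antichain of the maximal elements seen so far (a new value
--     is dropped if it lies below a current maximal element, and otherwise
--     evicts the elements lying below it); the result then filters the
--     size-descending stable sort of the input by membership in that antichain.
--     'below' means: bitwise subset with no larger popcount.
--     """
--     maximal = []  # antichain, as (value, popcount) pairs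
--     for g in dict.fromkeys(groups):
--         k = g.bit_count()
--         covered = False
--         evict = False
--         for m, j in maximal:
--             if k <= j and (g & m) == g:
--                 covered = True
--                 break
--             if j <= k and (m & g) == m:
--                 evict = True
--         if not covered:
--             if evict:
--                 maximal = [(m, j) for m, j in maximal
--                            if (m & g) != m or j > k]
--             maximal.append((g, k))
--     keep = {m for m, _ in maximal}
--     return [h for h in sorted(groups, key=lambda g: g.bit_count(), reverse=True)
--             if h in keep]
-- ===== Notes on version B (the rewrite author's own statement) =====
-- stated objective: alternative
-- what changed: Replaced A's per-element subsumption scan over a defaultdict size-index by online maximal-antichain maintenance: one pass over the distinct values keeps only the maximal elements (dropping a new value lying below a kept one, evicting kept values lying below the new one), and the result filters the size-descending stable sort of the input by membership in that antichain.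
import Mathlib
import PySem

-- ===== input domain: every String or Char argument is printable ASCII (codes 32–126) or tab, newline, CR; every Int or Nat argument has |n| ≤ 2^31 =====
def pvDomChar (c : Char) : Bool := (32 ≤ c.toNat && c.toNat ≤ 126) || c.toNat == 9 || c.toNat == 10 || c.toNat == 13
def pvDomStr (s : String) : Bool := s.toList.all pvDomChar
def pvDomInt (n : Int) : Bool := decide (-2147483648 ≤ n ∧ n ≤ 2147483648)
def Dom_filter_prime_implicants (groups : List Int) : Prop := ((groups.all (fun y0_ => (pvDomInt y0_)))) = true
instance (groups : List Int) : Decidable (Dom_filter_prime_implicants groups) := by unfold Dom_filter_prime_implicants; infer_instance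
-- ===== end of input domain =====

-- B replaces A's per-element scan over size buckets by online maximal-antichain
-- maintenance over the distinct values, then filters the sorted input by
-- membership in that antichain (objective: alternative).

-- ===== PORT A =====
-- inner 'for other in size_groups[size]' with its continue/break
def pvCheckBucket (g : Int) (gsize s : Nat) : List Int → Bool
  | [] => false
  | o :: rest =>
    if o = g then pvCheckBucket g gsize s rest
    else if gsize ≤ s ∧ PySem.Int.band g o = g then true
    else pvCheckBucket g gsize s rest

-- outer 'for size in sorted(size_groups.keys(), reverse=True)' with break on size < g_size
def pvCheckSizes (g : Int) (gsize : Nat) (sg : PySem.Dict Nat (List Int)) : List Nat → Bool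
  | [] => false
  | s :: rest =>
    if s < gsize then false
    else if pvCheckBucket g gsize s (sg.getD s []) then true
    else pvCheckSizes g gsize sg rest

def filter_prime_implicants (groups : List Int) : List Int :=
  if groups = [] then []
  else
    let gs := PySem.List.sorted groups (fun g => PySem.Int.bitCount g) true
    let sg : PySem.Dict Nat (List Int) :=
      gs.foldl (fun d g => d.modify (PySem.Int.bitCount g) [] (· ++ [g])) PySem.Dict.empty
    gs.foldl (fun primes g =>
      if ! pvCheckSizes g (PySem.Int.bitCount g) sg
             (PySem.List.sorted sg.keys (fun s => s) true)
      then primes ++ [g] else primes) []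

-- ===== PORT B =====
-- the inner 'for m, j in maximal' loop with its break, returning (covered, evict)
def pvScan (g : Int) (k : Nat) : List (Int × Nat) → Bool → Bool × Bool
  | [], evict => (false, evict)
  | (m, j) :: rest, evict =>
    if k ≤ j ∧ PySem.Int.band g m = g then (true, evict)
    else pvScan g k rest (evict || decide (j ≤ k ∧ PySem.Int.band m g = m))

def filter_prime_implicants_alt (groups : List Int) : List Int :=
  -- 'for g in dict.fromkeys(groups): …' maintaining the running antichain 'maximal'
  let maximal := (PySem.List.dedup groups).foldl
    (fun M g =>
      let k := PySem.Int.bitCount g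
      let r := pvScan g k M false
      if r.1 then M
      else (if r.2 then
              M.filter (fun p => !(decide (PySem.Int.band p.1 g = p.1) && decide (p.2 ≤ k)))
            else M) ++ [(g, k)])
    ([] : List (Int × Nat))
  -- 'keep = {m for m, _ in maximal}'
  let keep := PySem.Set.ofList (maximal.map (fun p => p.1))
  (PySem.List.sorted groups (fun g => PySem.Int.bitCount g) true).filter
    (fun h => decide (h ∈ keep))

-- ===== PRECONDITION & SPEC =====
def Spec_filter_prime_implicants (groups : List Int) (out : List Int) : Prop := out = filter_prime_implicants_alt groups
instance (groups : List Int) (out : List Int) : Decidable (Spec_filter_prime_implicants groups out) := by unfold Spec_filter_prime_implicants; infer_instance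

-- ===== CLAIM (what is proved, stated in full; the proofs are below) =====
def Claim_equal_filter_prime_implicants : Prop := ∀ (groups : List Int), Dom_filter_prime_implicants groups → Spec_filter_prime_implicants groups (filter_prime_implicants groups)

-- ===== LEMMAS AND PROOFS =====

-- proof-side abbreviation: g lies (weakly) below o — bitwise subset with no larger popcount
def pvBelow (g o : Int) : Bool :=
  decide (PySem.Int.band g o = g) && decide (PySem.Int.bitCount g ≤ PySem.Int.bitCount o)

-- the bucket for size s holds exactly the sorted groups of that popcount, in order
lemma pv_bucket (gs : List Int) (d : PySem.Dict Nat (List Int)) (s : Nat) :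
    (gs.foldl (fun d g => d.modify (PySem.Int.bitCount g) [] (· ++ [g])) d).getD s []
      = d.getD s [] ++ gs.filter (fun g => PySem.Int.bitCount g == s) := by
  induction gs generalizing d with
  | nil => simp
  | cons g t ih =>
    simp only [List.foldl_cons, ih, List.filter_cons]
    by_cases h : PySem.Int.bitCount g = s
    · subst h
      simp [PySem.Dict.getD_modify_self]
    · rw [PySem.Dict.getD_modify]
      simp [h, Ne.symm h]

-- every popcount occurring in gs is a key of the bucket dict
lemma pv_keys_cover (gs : List Int) (o : Int) (ho : o ∈ gs) :
    PySem.Int.bitCount o ∈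
      (gs.foldl (fun d g => d.modify (PySem.Int.bitCount g) [] (· ++ [g]))
        (PySem.Dict.empty : PySem.Dict Nat (List Int))).keys := by
  rw [PySem.Dict.keys_foldl_modify_key]
  exact (PySem.Set.mem_update _ _ _).mpr (Or.inr (List.mem_map_of_mem ho))

-- inner loop = flat any over the bucket
lemma pv_checkBucket_any (g : Int) (gsize s : Nat) (lst : List Int) :
    pvCheckBucket g gsize s lst
      = lst.any (fun o => decide (o ≠ g) && decide (gsize ≤ s) && decide (PySem.Int.band g o = g)) := by
  induction lst with
  | nil => rfl
  | cons o rest ih =>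
    simp only [pvCheckBucket, List.any_cons, ← ih]
    by_cases h1 : o = g
    · simp [h1]
    · by_cases h2 : gsize ≤ s ∧ PySem.Int.band g o = g
      · simp [h1, h2.1, h2.2]
      · rcases Decidable.not_and_iff_not_or_not.mp h2 with h | h <;> simp [h1, h]

-- size loop with its break, over a descending key list whose buckets are gs's popcount classes
lemma pv_checkSizes_iff (g : Int) (gsize : Nat) (gs : List Int)
    (sg : PySem.Dict Nat (List Int))
    (hb : ∀ s, sg.getD s [] = gs.filter (fun x => PySem.Int.bitCount x == s))
    (ks : List Nat) (hdesc : ks.Pairwise (fun a b => b ≤ a)) :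
    pvCheckSizes g gsize sg ks = true
      ↔ ∃ s ∈ ks, gsize ≤ s ∧ ∃ o ∈ gs, PySem.Int.bitCount o = s ∧ o ≠ g ∧ PySem.Int.band g o = g := by
  induction ks with
  | nil => simp [pvCheckSizes]
  | cons s rest ih =>
    rcases List.pairwise_cons.mp hdesc with ⟨hle, hrest⟩
    by_cases hlt : s < gsize
    · simp only [pvCheckSizes, if_pos hlt]
      constructor
      · intro h; cases h
      · rintro ⟨s', hs', hge, -⟩
        rcases List.mem_cons.mp hs' with rfl | hs'
        · omega
        · exact absurd hge (by have := hle s' hs'; omega)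
    · simp only [pvCheckSizes, if_neg hlt]
      rw [pv_checkBucket_any, hb]
      by_cases hhit :
          (gs.filter (fun x => PySem.Int.bitCount x == s)).any
            (fun o => decide (o ≠ g) && decide (gsize ≤ s) && decide (PySem.Int.band g o = g)) = true
      · rw [if_pos hhit]
        simp only [List.any_eq_true, List.mem_filter, Bool.and_eq_true, decide_eq_true_eq,
          beq_iff_eq] at hhit
        obtain ⟨o, ⟨ho, hbc⟩, ⟨hne, hle'⟩, hband⟩ := hhit
        exact iff_of_true rfl ⟨s, List.mem_cons_self .., hle', o, ho, hbc, hne, hband⟩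
      · rw [if_neg hhit, ih hrest]
        constructor
        · rintro ⟨s', hs', h⟩; exact ⟨s', List.mem_cons_of_mem _ hs', h⟩
        · rintro ⟨s', hs', hge, o, ho, hbc, hne, hband⟩
          rcases List.mem_cons.mp hs' with rfl | hs''
          · exact absurd (List.any_eq_true.mpr
              ⟨o, List.mem_filter.mpr ⟨ho, by simp [hbc]⟩, by simp [hne, hband, hge]⟩) hhit
          · exact ⟨s', hs'', hge, o, ho, hbc, hne, hband⟩

-- A's whole redundancy test = one flat any over the sorted list
lemma pv_check_eq_any (gs : List Int) (g : Int) :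
    (let sg : PySem.Dict Nat (List Int) :=
        gs.foldl (fun d x => d.modify (PySem.Int.bitCount x) [] (· ++ [x])) PySem.Dict.empty
     pvCheckSizes g (PySem.Int.bitCount g) sg (PySem.List.sorted sg.keys (fun s => s) true))
      = gs.any (fun o =>
          decide (o ≠ g) && decide (PySem.Int.bitCount g ≤ PySem.Int.bitCount o) &&
          decide (PySem.Int.band g o = g)) := by
  set sg : PySem.Dict Nat (List Int) :=
    gs.foldl (fun d x => d.modify (PySem.Int.bitCount x) [] (· ++ [x])) PySem.Dict.empty with hsg
  have hb : ∀ s, sg.getD s [] = gs.filter (fun x => PySem.Int.bitCount x == s) := by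
    intro s; rw [hsg, pv_bucket]; simp
  have hdesc := PySem.List.sorted_pairwise_rev sg.keys (fun s => s)
  rw [Bool.eq_iff_iff, pv_checkSizes_iff g _ gs sg hb _ hdesc]
  simp only [List.any_eq_true, Bool.and_eq_true, decide_eq_true_eq, PySem.List.mem_sorted]
  constructor
  · rintro ⟨s, _, hge, o, ho, hbc, hne, hband⟩
    exact ⟨o, ho, ⟨hne, by omega⟩, hband⟩
  · rintro ⟨o, ho, ⟨hne, hge⟩, hband⟩
    exact ⟨PySem.Int.bitCount o, by rw [hsg]; exact pv_keys_cover gs o ho, hge,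
      o, ho, rfl, hne, hband⟩

-- bitwise facts: PySem.Int.band agrees with Mathlib's Int.land, hence is associative
lemma pv_and_add_ldiff (m n : Nat) : (m &&& n) + m.ldiff n = m := by
  induction m using Nat.binaryRec generalizing n with
  | zero => simp [Nat.ldiff]
  | bit b m ih =>
    rw [← n.bit_testBit_zero_shiftRight_one, Nat.land_bit, Nat.ldiff_bit]
    have h := ih (n >>> 1)
    cases b <;> cases n.testBit 0 <;>
      simp only [Nat.bit, Bool.and_false, Bool.and_true, Bool.not_false, Bool.not_true,
        cond_false, cond_true] <;> omega

lemma pv_band_eq_land (a b : Int) : PySem.Int.band a b = Int.land a b := by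
  cases a with
  | ofNat m => cases b with
    | ofNat n => simp [PySem.Int.band, Int.land]
    | negSucc n =>
        have h1 : ¬ (0:Int) ≤ Int.negSucc n := by omega
        have h2 : (-(Int.negSucc n) - 1).toNat = n := by omega
        have h3 := pv_and_add_ldiff m n
        have h4 : m - (m &&& n) = m.ldiff n := by omega
        simp [PySem.Int.band, Int.land, h1, h4]
  | negSucc m => cases b with
    | ofNat n =>
        have h1 : ¬ (0:Int) ≤ Int.negSucc m := by omega
        have h2 : (-(Int.negSucc m) - 1).toNat = m := by omega
        have h3 := pv_and_add_ldiff n m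
        have h4 : n - (n &&& m) = n.ldiff m := by omega
        simp [PySem.Int.band, Int.land, h1, h4]
    | negSucc n =>
        have h1 : ¬ (0:Int) ≤ Int.negSucc m := by omega
        have h1' : ¬ (0:Int) ≤ Int.negSucc n := by omega
        have h2 : (-(Int.negSucc m) - 1).toNat = m := by omega
        have h2' : (-(Int.negSucc n) - 1).toNat = n := by omega
        simp [PySem.Int.band, Int.land, h1, h1']
        omega

lemma pv_int_ext (a b : Int) (h : ∀ i, a.testBit i = b.testBit i) : a = b := by
  cases a with
  | ofNat m => cases b with
    | ofNat n =>
        exact congrArg Int.ofNat (Nat.eq_of_testBit_eq fun i => by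
          have := h i; simpa [Int.testBit] using this)
    | negSucc n =>
        exfalso
        have hi := h (m + n + 1)
        have hm : m < 2 ^ (m + n + 1) := lt_of_le_of_lt (by omega) (Nat.lt_two_pow_self)
        have hn : n < 2 ^ (m + n + 1) := lt_of_le_of_lt (by omega) (Nat.lt_two_pow_self)
        simp [Int.testBit, Nat.testBit_lt_two_pow hm, Nat.testBit_lt_two_pow hn] at hi
  | negSucc m => cases b with
    | ofNat n =>
        exfalso
        have hi := h (m + n + 1)
        have hm : m < 2 ^ (m + n + 1) := lt_of_le_of_lt (by omega) (Nat.lt_two_pow_self)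
        have hn : n < 2 ^ (m + n + 1) := lt_of_le_of_lt (by omega) (Nat.lt_two_pow_self)
        simp [Int.testBit, Nat.testBit_lt_two_pow hm, Nat.testBit_lt_two_pow hn] at hi
    | negSucc n =>
        exact congrArg Int.negSucc (Nat.eq_of_testBit_eq fun i => by
          have := h i; simpa [Int.testBit] using this)

lemma pv_land_assoc (a b c : Int) : (a.land b).land c = a.land (b.land c) :=
  pv_int_ext _ _ fun i => by simp [Int.testBit_land, Bool.and_assoc]

-- the partial order behind B's antichain
lemma pv_below_refl (g : Int) : pvBelow g g = true := by
  simp [pvBelow, PySem.Int.band_self]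

lemma pv_below_trans {a b c : Int} (h1 : pvBelow a b = true) (h2 : pvBelow b c = true) :
    pvBelow a c = true := by
  simp only [pvBelow, Bool.and_eq_true, decide_eq_true_eq, pv_band_eq_land] at *
  refine ⟨?_, le_trans h1.2 h2.2⟩
  calc a.land c = (a.land b).land c := by rw [h1.1]
    _ = a.land (b.land c) := pv_land_assoc a b c
    _ = a.land b := by rw [h2.1]
    _ = a := h1.1

lemma pv_below_antisymm {a b : Int} (h1 : pvBelow a b = true) (h2 : pvBelow b a = true) :
    a = b := by
  simp only [pvBelow, Bool.and_eq_true, decide_eq_true_eq] at h1 h2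
  calc a = PySem.Int.band a b := h1.1.symm
    _ = PySem.Int.band b a := PySem.Int.band_comm a b
    _ = b := h2.1

-- the antichain fold computes exactly the maximal elements of P ++ D
lemma pv_maximal_invariant (D : List Int) :
    ∀ (P M : List Int), (P ++ D).Nodup →
    (∀ m ∈ M, m ∈ P) →
    (∀ s ∈ P, ∃ m ∈ M, pvBelow s m = true) →
    (∀ m ∈ M, ∀ o ∈ P, o ≠ m → pvBelow m o = false) →
    ∀ g, g ∈ D.foldl
        (fun M g => if M.any (fun m => pvBelow g m) then M
                    else M.filter (fun m => !pvBelow m g) ++ [g]) M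
      ↔ g ∈ P ++ D ∧ ∀ o ∈ P ++ D, o ≠ g → pvBelow g o = false := by
  induction D with
  | nil =>
    intro P M _ h1 h2 h3 g
    simp only [List.foldl_nil, List.append_nil]
    constructor
    · intro hg; exact ⟨h1 g hg, fun o ho hne => h3 g hg o ho hne⟩
    · rintro ⟨hgP, hmax⟩
      obtain ⟨m, hm, hbel⟩ := h2 g hgP
      by_cases heq : m = g
      · exact heq ▸ hm
      · exact absurd hbel (by simp [hmax m (h1 m hm) heq])
  | cons d D' ih =>
    intro P M hnd h1 h2 h3 g
    have hndP : d ∉ P := by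
      intro hd
      have := List.disjoint_of_nodup_append hnd hd
      simp at this
    have hnd' : ((P ++ [d]) ++ D').Nodup := by simpa using hnd
    simp only [List.foldl_cons]
    by_cases hany : M.any (fun m => pvBelow d m) = true
    · rw [if_pos hany]
      obtain ⟨m0, hm0, hbel0⟩ := List.any_eq_true.mp hany
      have h1' : ∀ m ∈ M, m ∈ P ++ [d] := fun m hm => by
        simp [h1 m hm]
      have h2' : ∀ s ∈ P ++ [d], ∃ m ∈ M, pvBelow s m = true := by
        intro s hs
        rcases List.mem_append.mp hs with hs | hs
        · exact h2 s hs
        · simp only [List.mem_singleton] at hs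
          exact hs ▸ ⟨m0, hm0, hbel0⟩
      have h3' : ∀ m ∈ M, ∀ o ∈ P ++ [d], o ≠ m → pvBelow m o = false := by
        intro m hm o ho hne
        rcases List.mem_append.mp ho with ho | ho
        · exact h3 m hm o ho hne
        · simp only [List.mem_singleton] at ho
          rw [ho]
          by_contra hb
          have hmd : pvBelow m d = true := by
            cases hx : pvBelow m d
            · exact absurd hx hb
            · rfl
          have hmm0 : pvBelow m m0 = true := pv_below_trans hmd hbel0
          by_cases hmm : m0 = m
          · subst hmm
            exact hndP (pv_below_antisymm hbel0 hmd ▸ h1 m0 hm0)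
          · exact absurd hmm0 (by simp [h3 m hm m0 (h1 m0 hm0) hmm])
      have := ih (P ++ [d]) M hnd' h1' h2' h3' g
      simpa using this
    · rw [if_neg hany]
      have hnone : ∀ m ∈ M, pvBelow d m = false := by
        intro m hm
        cases hx : pvBelow d m
        · rfl
        · exact absurd (List.any_eq_true.mpr ⟨m, hm, hx⟩) hany
      have h1' : ∀ m ∈ M.filter (fun m => !pvBelow m d) ++ [d], m ∈ P ++ [d] := by
        intro m hm
        rcases List.mem_append.mp hm with hm | hm
        · exact List.mem_append.mpr (Or.inl (h1 m (List.mem_of_mem_filter hm)))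
        · exact List.mem_append.mpr (Or.inr hm)
      have h2' : ∀ s ∈ P ++ [d], ∃ m ∈ M.filter (fun m => !pvBelow m d) ++ [d],
          pvBelow s m = true := by
        intro s hs
        rcases List.mem_append.mp hs with hs | hs
        · obtain ⟨m, hm, hbel⟩ := h2 s hs
          by_cases hmd : pvBelow m d = true
          · exact ⟨d, by simp, pv_below_trans hbel hmd⟩
          · refine ⟨m, List.mem_append.mpr (Or.inl (List.mem_filter.mpr ⟨hm, by simp [hmd]⟩)), hbel⟩
        · simp only [List.mem_singleton] at hs
          rw [hs]
          exact ⟨d, by simp, pv_below_refl d⟩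
      have h3' : ∀ m ∈ M.filter (fun m => !pvBelow m d) ++ [d],
          ∀ o ∈ P ++ [d], o ≠ m → pvBelow m o = false := by
        intro m hm o ho hne
        rcases List.mem_append.mp hm with hm | hm
        · obtain ⟨hmM, hkeep⟩ := List.mem_filter.mp hm
          rcases List.mem_append.mp ho with ho | ho
          · exact h3 m hmM o ho hne
          · simp only [List.mem_singleton] at ho
            subst ho
            simpa using hkeep
        · simp only [List.mem_singleton] at hm
          subst hm
          rcases List.mem_append.mp ho with ho | ho
          · by_contra hb
            have hdo : pvBelow m o = true := by
              cases hx : pvBelow m o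
              · exact absurd hx hb
              · rfl
            obtain ⟨m', hm', hbel'⟩ := h2 o ho
            exact absurd (pv_below_trans hdo hbel') (by simp [hnone m' hm'])
          · simp only [List.mem_singleton] at ho
            exact absurd ho hne
      have := ih (P ++ [d]) _ hnd' h1' h2' h3' g
      simpa using this

-- membership in B's final antichain = "no distinct element lies strictly above"
lemma pv_maximal_mem (D : List Int) (hD : D.Nodup) (g : Int) :
    g ∈ D.foldl
        (fun M g => if M.any (fun m => pvBelow g m) then M
                    else M.filter (fun m => !pvBelow m g) ++ [g]) []
      ↔ g ∈ D ∧ ∀ o ∈ D, o ≠ g → pvBelow g o = false := by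
  have := pv_maximal_invariant D [] [] (by simpa using hD)
    (by simp) (by simp) (by simp) g
  simpa using this


-- the scan's 'covered' flag = some antichain member lies above g
lemma pv_scan_cov (g : Int) (M : List Int) (e : Bool) :
    (pvScan g (PySem.Int.bitCount g) (M.map (fun m => (m, PySem.Int.bitCount m))) e).1
      = M.any (fun m => pvBelow g m) := by
  induction M generalizing e with
  | nil => rfl
  | cons m t ih =>
    simp only [List.map_cons, pvScan, List.any_cons]
    by_cases h : PySem.Int.bitCount g ≤ PySem.Int.bitCount m ∧ PySem.Int.band g m = g
    · simp [h, pvBelow, h.1, h.2]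
    · rw [if_neg h, ih]
      have hb : pvBelow g m = false := by
        simp only [pvBelow, Bool.and_eq_false_iff, decide_eq_false_iff_not]
        rcases Decidable.not_and_iff_not_or_not.mp h with h | h
        · exact Or.inr h
        · exact Or.inl h
      simp [hb]

-- when nothing covers g, the scan's 'evict' flag = some antichain member lies below g
lemma pv_scan_ev (g : Int) (M : List Int) (e : Bool)
    (hcov : M.any (fun m => pvBelow g m) = false) :
    (pvScan g (PySem.Int.bitCount g) (M.map (fun m => (m, PySem.Int.bitCount m))) e).2
      = (e || M.any (fun m => pvBelow m g)) := by
  induction M generalizing e with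
  | nil => simp [pvScan]
  | cons m t ih =>
    simp only [List.any_cons, Bool.or_eq_false_iff] at hcov
    obtain ⟨h1, h2⟩ := hcov
    have hnot : ¬ (PySem.Int.bitCount g ≤ PySem.Int.bitCount m ∧ PySem.Int.band g m = g) := by
      intro hc
      simp [pvBelow, hc.1, hc.2] at h1
    simp only [List.map_cons, pvScan, if_neg hnot, List.any_cons]
    rw [ih _ h2]
    have hd : (decide (PySem.Int.bitCount m ≤ PySem.Int.bitCount g ∧ PySem.Int.band m g = m))
        = pvBelow m g := by
      simp [pvBelow, Bool.and_comm]
    rw [hd, Bool.or_assoc]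

-- one step of B's pair-carrying fold simulates one step of the plain fold on values
lemma pv_step_map (M : List Int) (g : Int) :
    (let k := PySem.Int.bitCount g
     let r := pvScan g k (M.map (fun m => (m, PySem.Int.bitCount m))) false
     if r.1 then M.map (fun m => (m, PySem.Int.bitCount m))
     else (if r.2 then
             (M.map (fun m => (m, PySem.Int.bitCount m))).filter
               (fun p => !(decide (PySem.Int.band p.1 g = p.1) && decide (p.2 ≤ k)))
           else M.map (fun m => (m, PySem.Int.bitCount m))) ++ [(g, k)])
    = (if M.any (fun m => pvBelow g m) then M
       else M.filter (fun m => !pvBelow m g) ++ [g]).map (fun m => (m, PySem.Int.bitCount m)) := by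
  show (if (pvScan g (PySem.Int.bitCount g) (M.map (fun m => (m, PySem.Int.bitCount m))) false).1
          then M.map (fun m => (m, PySem.Int.bitCount m))
          else _ ++ [(g, PySem.Int.bitCount g)]) = _
  rw [pv_scan_cov g M false]
  cases hcov : M.any (fun m => pvBelow g m) with
  | true => simp
  | false =>
    rw [pv_scan_ev g M false hcov, Bool.false_or]
    simp only [Bool.false_eq_true, if_false, List.map_append]
    have hfm : (M.map (fun m => (m, PySem.Int.bitCount m))).filter
          (fun p => !(decide (PySem.Int.band p.1 g = p.1) && decide (p.2 ≤ PySem.Int.bitCount g)))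
        = (M.filter (fun m => !pvBelow m g)).map (fun m => (m, PySem.Int.bitCount m)) := by
      rw [List.filter_map]
      refine congrArg _ (List.filter_congr ?_)
      intro m _
      simp [pvBelow, Function.comp]
    cases hev : M.any (fun m => pvBelow m g) with
    | true =>
      rw [if_pos (by trivial), hfm]
      simp
    | false =>
      have hid : M.filter (fun m => !pvBelow m g) = M := by
        apply List.filter_eq_self.mpr
        intro m hm
        simp only [List.any_eq_false] at hev
        simp [hev m hm]
      simp [hid]

-- the whole pair-carrying fold = the plain fold on values, tagged with popcounts
lemma pv_fold_pairs (D : List Int) : ∀ (M : List Int),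
    D.foldl
      (fun M g =>
        let k := PySem.Int.bitCount g
        let r := pvScan g k M false
        if r.1 then M
        else (if r.2 then
                M.filter (fun p => !(decide (PySem.Int.band p.1 g = p.1) && decide (p.2 ≤ k)))
              else M) ++ [(g, k)])
      (M.map (fun m => (m, PySem.Int.bitCount m)))
    = (D.foldl
        (fun M g => if M.any (fun m => pvBelow g m) then M
                    else M.filter (fun m => !pvBelow m g) ++ [g]) M).map
        (fun m => (m, PySem.Int.bitCount m)) := by
  induction D with
  | nil => intro M; rfl
  | cons d D' ih =>
    intro M
    simp only [List.foldl_cons]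
    rw [pv_step_map M d]
    exact ih _

-- ===== VERDICT (by name: the statement is the Claim_ definition above) =====
theorem filter_prime_implicants_spec : Claim_equal_filter_prime_implicants := by
  intro groups _
  unfold Spec_filter_prime_implicants filter_prime_implicants filter_prime_implicants_alt
  by_cases hnil : groups = []
  · simp [hnil]
  · rw [if_neg hnil]
    set gs := PySem.List.sorted groups (fun g => PySem.Int.bitCount g) true with hgs
    rw [PySem.List.foldl_append_if_eq_filter]
    simp only [List.nil_append]
    have hfold := pv_fold_pairs (PySem.List.dedup groups) []
    simp only [List.map_nil] at hfold
    rw [hfold]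
    apply List.filter_congr
    intro g hg
    rw [pv_check_eq_any gs g]
    have hgmem : g ∈ groups := (PySem.List.mem_sorted _ _ _ _).mp (hgs ▸ hg)
    have hmem := pv_maximal_mem (PySem.List.dedup groups) (PySem.List.nodup_dedup groups) g
    rw [Bool.eq_iff_iff]
    simp only [List.map_map, Function.comp, PySem.Set.mem_ofList, List.mem_map,
      Bool.not_eq_true', decide_eq_true_eq]
    rw [List.any_eq_false]
    have hmem' : (∃ a ∈ (PySem.List.dedup groups).foldl
          (fun M g => if M.any (fun m => pvBelow g m) then M
                      else M.filter (fun m => !pvBelow m g) ++ [g]) [], a = g)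
        ↔ (g ∈ PySem.List.dedup groups ∧
            ∀ o ∈ PySem.List.dedup groups, o ≠ g → pvBelow g o = false) := by
      rw [← hmem]
      constructor
      · rintro ⟨a, ha, rfl⟩; exact ha
      · intro h; exact ⟨g, h, rfl⟩
    rw [hmem']
    constructor
    · intro hA
      refine ⟨(PySem.List.mem_dedup _ _).mpr hgmem, ?_⟩
      intro o ho hne
      have ho' : o ∈ gs := (PySem.List.mem_sorted _ _ _ _).mpr ((PySem.List.mem_dedup _ _).mp ho)
      have h := hA o ho'
      simp only [Bool.and_eq_true, decide_eq_true_eq] at h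
      simp only [pvBelow, Bool.and_eq_false_iff, decide_eq_false_iff_not]
      by_cases hle : PySem.Int.bitCount g ≤ PySem.Int.bitCount o
      · exact Or.inl (fun hband => h ⟨⟨hne, hle⟩, hband⟩)
      · exact Or.inr hle
    · rintro ⟨-, hmax⟩ o ho hP
      simp only [Bool.and_eq_true, decide_eq_true_eq] at hP
      obtain ⟨⟨hne, hle⟩, hband⟩ := hP
      have ho' : o ∈ PySem.List.dedup groups :=
        (PySem.List.mem_dedup _ _).mpr ((PySem.List.mem_sorted _ _ _ _).mp ho)
      have := hmax o ho' hne
      simp [pvBelow, hband, hle] at this
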